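-- pv_equiv track=rewrite | github.com/Aswendt-Lab/AIDAmri | bin/4.1_ROI_analysis/pv_parser.py | replace_jcamp_strings
-- ===== SOURCE A (Python) =====
-- def replace_jcamp_strings(string):
--     pos_stop = 0
--     elements = []
--     str_list = []
--     index = 0
--     while True:
--         pos_start = string.find('<', pos_stop)
--         if pos_start < 0:
--             elements.append(string[pos_stop:])
--             break
--         elements.append(string[pos_stop:pos_start])
--         pos_stop = string.find('>', pos_start + 1)
--         if pos_stop < 0:
--             elements.append(string[pos_start:])
--             break
--         pos_stop += 1
--         elements.append(''.join(['<#', str(index), '>']))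
--         str_list.append(string[pos_start:pos_stop])
--         index += 1
--
--     return (''.join(elements), str_list)
-- ===== SOURCE B (Python) =====
-- def replace_jcamp_strings(string):
--     # single left-to-right character scan with an explicit in-token buffer,
--     # instead of repeated find() calls and index slicing
--     pieces = []
--     str_list = []
--     buf = None
--     for ch in string:
--         if buf is None:
--             if ch == '<':
--                 buf = ['<']
--             else:
--                 pieces.append(ch)
--         else:
--             buf.append(ch)
--             if ch == '>':
--                 pieces.append('<#' + str(len(str_list)) + '>')
--                 str_list.append(''.join(buf))
--                 buf = None
--     if buf is not None:
--         pieces.append(''.join(buf))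
--     return (''.join(pieces), str_list)
-- ===== Notes on version B (the rewrite author's own statement) =====
-- stated objective: alternative
-- what changed: A repeatedly calls string.find twice per token and slices by index; B is a single character-by-character state-machine scan that carries an optional in-token buffer and never indexes or slices.
import Mathlib
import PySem

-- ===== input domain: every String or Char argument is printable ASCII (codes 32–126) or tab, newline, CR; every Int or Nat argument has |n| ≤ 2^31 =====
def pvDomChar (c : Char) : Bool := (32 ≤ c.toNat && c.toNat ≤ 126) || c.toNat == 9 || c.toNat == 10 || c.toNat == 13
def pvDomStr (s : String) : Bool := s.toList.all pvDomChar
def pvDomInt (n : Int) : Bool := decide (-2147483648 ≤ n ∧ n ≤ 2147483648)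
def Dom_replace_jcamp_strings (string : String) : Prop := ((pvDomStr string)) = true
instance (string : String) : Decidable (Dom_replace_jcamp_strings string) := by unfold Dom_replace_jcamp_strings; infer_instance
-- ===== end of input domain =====

-- B replaces A's repeated find/slice loop by a single character state-machine scan; same O(n) cost (objective: alternative).

-- ===== PORT A =====
-- helper lemma for aGo's termination: a non-negative findFrom result lies in [start, length)
theorem pvFindGo_le {sub t : List Char} {k : Nat} (h : PySem.Chars.find.go sub t k ≠ -1) :
    (k : Int) ≤ PySem.Chars.find.go sub t k := by
  induction t generalizing k with
  | nil =>
    simp [PySem.Chars.find.go] at h ⊢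
    simp [h]
  | cons a t ih =>
    simp only [PySem.Chars.find.go] at h ⊢
    split at h
    · simp_all
    · simp only [*] at *
      have := ih h
      push_cast at this ⊢
      omega

theorem pvFindGo_lt {c : Char} {t : List Char} {k : Nat} (h : PySem.Chars.find.go [c] t k ≠ -1) :
    PySem.Chars.find.go [c] t k < ((k : Int) + t.length) := by
  induction t generalizing k with
  | nil => simp [PySem.Chars.find.go] at h
  | cons a t ih =>
    simp only [PySem.Chars.find.go, List.length_cons] at h ⊢
    split at h
    · simp only [*]
      push_cast [List.length_cons]
      omega
    · simp only [*]
      have := ih h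
      push_cast at this ⊢
      omega

theorem pvFindFrom_bounds (s : List Char) (c : Char) (p : Nat)
    (h : ¬ PySem.Chars.findFrom s [c] (p : Int) none < 0) :
    (p : Int) ≤ PySem.Chars.findFrom s [c] (p : Int) none ∧
      PySem.Chars.findFrom s [c] (p : Int) none < (s.length : Int) := by
  have hple : p ≤ s.length := by
    by_contra hgt
    have : PySem.Chars.findFrom s [c] (p : Int) none = -1 := by
      simp only [PySem.Chars.findFrom]
      have : (s.length : Int) < (p : Int) := by exact_mod_cast Nat.lt_of_not_le hgt
      simp only [if_neg (by omega : ¬ (p : Int) < 0)]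
      rw [if_pos this]
    omega
  rw [PySem.Chars.findFrom_natCast s [c] p hple] at h ⊢
  split at h
  · omega
  · rename_i hne
    constructor
    · have : (0 : Int) ≤ PySem.Chars.find (s.drop p) [c] := by
        have := pvFindGo_le (sub := [c]) (t := s.drop p) (k := 0) (by
          simpa [PySem.Chars.find] using hne)
        simpa [PySem.Chars.find] using this
      simp only [if_neg hne]
      omega
    · have hlt := pvFindGo_lt (c := c) (t := s.drop p) (k := 0) (by
        simpa [PySem.Chars.find] using hne)
      simp only [if_neg hne]
      simp only [PySem.Chars.find] at hne
      simp only [List.length_drop] at hlt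
      push_cast at hlt
      simp only [PySem.Chars.find]
      omega

def aGo (s : List Char) (pos_stop : Nat) (index : Int) : List Char × List String :=
  let f1 := PySem.Chars.findFrom s ['<'] (pos_stop : Int) none
  if h1 : f1 < 0 then
    (PySem.List.slice s (some (pos_stop : Int)) none, [])
  else
    let pos_start := f1.toNat
    let f2 := PySem.Chars.findFrom s ['>'] ((pos_start : Int) + 1) none
    if h2 : f2 < 0 then
      (PySem.List.slice s (some (pos_stop : Int)) (some (pos_start : Int)) ++
         PySem.List.slice s (some (pos_start : Int)) none, [])
    else
      let pos_stop' := f2.toNat + 1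
      let r := aGo s pos_stop' (index + 1)
      (PySem.List.slice s (some (pos_stop : Int)) (some (pos_start : Int)) ++
         (['<', '#'] ++ PySem.Int.toChars index ++ ['>']) ++ r.1,
       String.mk (PySem.List.slice s (some (pos_start : Int)) (some ((pos_stop' : Nat) : Int))) :: r.2)
termination_by s.length + 1 - pos_stop
decreasing_by
  have hb1 := pvFindFrom_bounds s '<' pos_stop h1
  have harg : (((PySem.Chars.findFrom s ['<'] (pos_stop : Int) none).toNat + 1 : Nat) : Int) =
      ((PySem.Chars.findFrom s ['<'] (pos_stop : Int) none).toNat : Int) + 1 := by push_cast; ring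
  have hb2 := pvFindFrom_bounds s '>' ((PySem.Chars.findFrom s ['<'] (pos_stop : Int) none).toNat + 1)
    (by rw [harg]; exact h2)
  rw [harg] at hb2
  omega

def replace_jcamp_strings (string : String) : String × List String :=
  let r := aGo string.toList 0 0
  (String.mk r.1, r.2)

-- ===== PORT B =====
def bGo : List Char → Option (List Char) → Nat → List Char × List String
  | [], none, _ => ([], [])
  | [], some buf, _ => (buf, [])
  | a :: rest, none, k =>
    if a = '<' then bGo rest (some ['<']) k
    else
      let r := bGo rest none k
      (a :: r.1, r.2)
  | a :: rest, some buf, k =>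
    let buf' := buf ++ [a]
    if a = '>' then
      let r := bGo rest none (k + 1)
      ('<' :: '#' :: (PySem.Int.toChars (k : Int) ++ ['>'] ++ r.1), String.mk buf' :: r.2)
    else bGo rest (some buf') k

def replace_jcamp_strings_alt (string : String) : String × List String :=
  let r := bGo string.toList none 0
  (String.mk r.1, r.2)

-- ===== PRECONDITION & SPEC =====
def Spec_replace_jcamp_strings (string : String) (out : String × List String) : Prop := out = replace_jcamp_strings_alt string
instance (string : String) (out : String × List String) : Decidable (Spec_replace_jcamp_strings string out) := by unfold Spec_replace_jcamp_strings; infer_instance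

-- ===== CLAIM (what is proved, stated in full; the proofs are below) =====
def Claim_equal_replace_jcamp_strings : Prop := ∀ (string : String), Dom_replace_jcamp_strings string → Spec_replace_jcamp_strings string (replace_jcamp_strings string)

-- ===== LEMMAS AND PROOFS =====
theorem pvSplit (c : Char) (t : List Char) (h : c ∈ t) :
    ∃ pre u, t = pre ++ c :: u ∧ c ∉ pre := by
  induction t with
  | nil => simp at h
  | cons a t ih =>
    by_cases hac : a = c
    · exact ⟨[], t, by simp [hac], by simp⟩
    · have : c ∈ t := by
        rcases List.mem_cons.mp h with h' | h'
        · exact absurd h'.symm hac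
        · exact h'
      obtain ⟨pre, u, hequ, hpre⟩ := ih this
      exact ⟨a :: pre, u, by simp [hequ], by simp only [List.mem_cons, not_or]; exact ⟨fun hh => hac hh.symm, hpre⟩⟩

theorem pvFind_none (c : Char) (t : List Char) (h : c ∉ t) :
    PySem.Chars.find t [c] = -1 := by
  rw [PySem.Chars.find_eq_neg_one_iff]
  rw [List.singleton_infix_iff]
  exact h

theorem pvFindGo_split (c : Char) (pre u : List Char) (k : Nat) (h : c ∉ pre) :
    PySem.Chars.find.go [c] (pre ++ c :: u) k = ((k + pre.length : Nat) : Int) := by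
  induction pre generalizing k with
  | nil => simp [PySem.Chars.find.go, List.isPrefixOf]
  | cons a pre ih =>
    have hac : ¬ (c == a) = true := by
      simp only [beq_iff_eq]
      intro hh
      exact h (by simp [hh])
    simp only [List.cons_append, PySem.Chars.find.go, List.isPrefixOf, hac, Bool.false_and,
      Bool.false_eq_true, if_false]
    rw [ih (k + 1) (by simp at h; exact h.2)]
    push_cast [List.length_cons]
    ring

theorem pvFind_split (c : Char) (pre u : List Char) (h : c ∉ pre) :
    PySem.Chars.find (pre ++ c :: u) [c] = (pre.length : Int) := by
  have := pvFindGo_split c pre u 0 h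
  simpa [PySem.Chars.find] using this

theorem pvBGo_none_no (t : List Char) (k : Nat) (h : '<' ∉ t) : bGo t none k = (t, []) := by
  induction t with
  | nil => simp [bGo]
  | cons a t ih =>
    simp only [List.mem_cons, not_or] at h
    have ha : a ≠ '<' := fun hh => h.1 hh.symm
    simp [bGo, ha, ih h.2]

theorem pvBGo_none_pre (pre u : List Char) (k : Nat) (h : '<' ∉ pre) :
    bGo (pre ++ u) none k = (pre ++ (bGo u none k).1, (bGo u none k).2) := by
  induction pre with
  | nil => simp
  | cons a pre ih =>
    simp only [List.mem_cons, not_or] at h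
    have ha : a ≠ '<' := fun hh => h.1 hh.symm
    simp [bGo, ha, ih h.2]

theorem pvBGo_some_no (t buf : List Char) (k : Nat) (h : '>' ∉ t) :
    bGo t (some buf) k = (buf ++ t, []) := by
  induction t generalizing buf with
  | nil => simp [bGo]
  | cons a t ih =>
    simp only [List.mem_cons, not_or] at h
    have ha : a ≠ '>' := fun hh => h.1 hh.symm
    simp only [bGo, if_neg ha]
    rw [ih (buf ++ [a]) h.2]
    simp

theorem pvBGo_some_split (mid u buf : List Char) (k : Nat) (h : '>' ∉ mid) :
    bGo (mid ++ '>' :: u) (some buf) k =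
      ('<' :: '#' :: (PySem.Int.toChars (k : Int) ++ ['>'] ++ (bGo u none (k + 1)).1),
       String.mk (buf ++ mid ++ ['>']) :: (bGo u none (k + 1)).2) := by
  induction mid generalizing buf with
  | nil => simp [bGo]
  | cons a mid ih =>
    simp only [List.mem_cons, not_or] at h
    have ha : a ≠ '>' := fun hh => h.1 hh.symm
    simp only [List.cons_append, bGo, if_neg ha]
    rw [ih (buf ++ [a]) h.2]
    simp

theorem main_lemma (s : List Char) (N p k : Nat) (hN : s.length - p ≤ N) (hp : p ≤ s.length) :
    aGo s p (k : Int) = bGo (s.drop p) none k := by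
  induction N using Nat.strong_induction_on generalizing p k with
  | _ N ih =>
  have hfa := PySem.Chars.findFrom_natCast s ['<'] p hp
  by_cases hmem : '<' ∈ s.drop p
  · obtain ⟨pre, u, ht, hpre⟩ := pvSplit '<' _ hmem
    have hlen : s.length = p + pre.length + 1 + u.length := by
      have := congrArg List.length ht
      simp only [List.length_drop, List.length_append, List.length_cons] at this
      omega
    have hfind : PySem.Chars.find (s.drop p) ['<'] = (pre.length : Int) := by
      rw [ht]; exact pvFind_split '<' pre u hpre
    have hf1 : PySem.Chars.findFrom s ['<'] (p : Int) none = ((p + pre.length : Nat) : Int) := by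
      rw [hfa, hfind]
      have : ¬ ((pre.length : Int) = -1) := by omega
      rw [if_neg this]
      push_cast; ring
    have hdropu : s.drop (p + pre.length + 1) = u := by
      have h1 : s.drop (p + pre.length + 1) = (s.drop p).drop (pre.length + 1) := by
        rw [List.drop_drop]
        congr 1
      rw [h1, ht]
      rw [show pre ++ '<' :: u = (pre ++ ['<']) ++ u by simp]
      rw [List.drop_left' (by simp)]
    rw [aGo]
    rw [dif_neg (by rw [hf1]; push_cast; omega)]
    by_cases hmem2 : '>' ∈ u
    · obtain ⟨mid, rest2, hu, hmid⟩ := pvSplit '>' _ hmem2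
      have hfind2 : PySem.Chars.find (s.drop (p + pre.length + 1)) ['>'] = (mid.length : Int) := by
        rw [hdropu, hu]; exact pvFind_split '>' mid rest2 hmid
      have hf2 : PySem.Chars.findFrom s ['>'] (((p + pre.length : Nat) : Int) + 1) none
          = ((p + pre.length + 1 + mid.length : Nat) : Int) := by
        rw [show (((p + pre.length : Nat) : Int) + 1) = ((p + pre.length + 1 : Nat) : Int) by push_cast; ring]
        rw [PySem.Chars.findFrom_natCast s ['>'] (p + pre.length + 1) (by omega), hfind2]
        rw [if_neg (by omega)]
        push_cast; ring
      rw [hf1]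
      simp only [Int.toNat_natCast, hf2]
      rw [dif_neg (by push_cast; omega)]
      have hulen : u.length = mid.length + 1 + rest2.length := by
        have := congrArg List.length hu
        simp only [List.length_append, List.length_cons] at this
        omega
      have hdropr : s.drop (p + pre.length + 1 + mid.length + 1) = rest2 := by
        have h1 : s.drop (p + pre.length + 1 + mid.length + 1)
            = (s.drop (p + pre.length + 1)).drop (mid.length + 1) := by
          rw [List.drop_drop]
          congr 1
        rw [h1, hdropu, hu]
        rw [show mid ++ '>' :: rest2 = (mid ++ ['>']) ++ rest2 by simp]
        rw [List.drop_left' (by simp)]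
      have hihm := ih (s.length - (p + pre.length + 1 + mid.length + 1)) (by omega)
        (p + pre.length + 1 + mid.length + 1) (k + 1) (by omega) (by omega)
      rw [hdropr] at hihm
      -- slices
      have hslice1 : PySem.List.slice s (some ((p : Nat) : Int)) (some ((p + pre.length : Nat) : Int)) = pre := by
        rw [PySem.List.slice_natCast]
        rw [show p + pre.length - p = pre.length by omega]
        rw [ht, List.take_left' rfl]
      have htok : PySem.List.slice s (some ((p + pre.length : Nat) : Int))
          (some ((p + pre.length + 1 + mid.length + 1 : Nat) : Int)) = '<' :: mid ++ ['>'] := by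
        rw [PySem.List.slice_natCast]
        have hd : s.drop (p + pre.length) = '<' :: u := by
          have h1 : s.drop (p + pre.length) = (s.drop p).drop pre.length := by
            rw [List.drop_drop]
          rw [h1, ht, List.drop_left' rfl]
        rw [hd, hu]
        rw [show p + pre.length + 1 + mid.length + 1 - (p + pre.length) = mid.length + 2 by omega]
        simp [List.take_append]
      rw [ht, hu]
      rw [pvBGo_none_pre pre ('<' :: (mid ++ '>' :: rest2)) k hpre]
      rw [show bGo ('<' :: (mid ++ '>' :: rest2)) none k = bGo (mid ++ '>' :: rest2) (some ['<']) k by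
        simp [bGo]]
      rw [pvBGo_some_split mid rest2 ['<'] k hmid]
      rw [hslice1, htok]
      push_cast at hihm
      rw [hihm]
      simp
    · have hfind2 : PySem.Chars.find (s.drop (p + pre.length + 1)) ['>'] = -1 := by
        rw [hdropu]; exact pvFind_none '>' u hmem2
      have hf2 : PySem.Chars.findFrom s ['>'] (((p + pre.length : Nat) : Int) + 1) none = -1 := by
        rw [show (((p + pre.length : Nat) : Int) + 1) = ((p + pre.length + 1 : Nat) : Int) by push_cast; ring]
        rw [PySem.Chars.findFrom_natCast s ['>'] (p + pre.length + 1) (by omega), hfind2]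
        simp
      rw [hf1]
      simp only [Int.toNat_natCast, hf2]
      rw [dif_pos (by omega)]
      have hslice1 : PySem.List.slice s (some ((p : Nat) : Int)) (some ((p + pre.length : Nat) : Int)) = pre := by
        rw [PySem.List.slice_natCast]
        rw [show p + pre.length - p = pre.length by omega]
        rw [ht, List.take_left' rfl]
      have hslice2 : PySem.List.slice s (some ((p + pre.length : Nat) : Int)) none = '<' :: u := by
        rw [PySem.List.slice_from_natCast]
        have h1 : s.drop (p + pre.length) = (s.drop p).drop pre.length := by
          rw [List.drop_drop]
        rw [h1, ht, List.drop_left' rfl]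
      rw [hslice1, hslice2, ht]
      rw [pvBGo_none_pre pre ('<' :: u) k hpre]
      rw [show bGo ('<' :: u) none k = bGo u (some ['<']) k by simp [bGo]]
      rw [pvBGo_some_no u ['<'] k hmem2]
      simp
  · have hfind : PySem.Chars.find (s.drop p) ['<'] = -1 := pvFind_none '<' _ hmem
    rw [aGo]
    rw [dif_pos (by rw [hfa, hfind]; simp)]
    rw [PySem.List.slice_from_natCast]
    rw [pvBGo_none_no _ k hmem]

-- ===== VERDICT (by name: the statement is the Claim_ definition above) =====
theorem replace_jcamp_strings_spec : Claim_equal_replace_jcamp_strings := by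
  intro string _
  unfold Spec_replace_jcamp_strings replace_jcamp_strings replace_jcamp_strings_alt
  have h := main_lemma string.toList string.toList.length 0 0 (by omega) (by omega)
  simp only [List.drop_zero, Nat.cast_zero] at h
  rw [h]
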